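-- pv_equiv track=rewrite | github.com/AkshdeepSharma/Classroom | Kattis/closingtheloop.py | close_the_loop
-- ===== SOURCE A (Python) =====
-- def close_the_loop(red, blue):
--     length = 0
--     strings_used = 0
--     curr_colour = True
--     red, blue = sorted(red), sorted(blue)
--     if len(blue) == len(red):
--         return sum(blue) + sum(red) - len(blue) - len(red)
--     if len(red) < len(blue):
--         red, blue = blue, red
--
--     while red and blue:
--         if curr_colour:
--             string = red.pop()
--         else:
--             string = blue.pop()
--         length += string
--         strings_used += 1
--         curr_colour = not curr_colour
--     return length - strings_used
-- ===== SOURCE B (Python) =====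
-- def close_the_loop(red, blue):
--     # closed formula: use all strings of the shorter colour, and the
--     # len(shorter) largest strings of the longer colour; each used string
--     # loses one character to the overlap.
--     if len(red) < len(blue):
--         red, blue = blue, red
--     k = len(blue)
--     return sum(blue) + sum(sorted(red)[len(red) - k:]) - 2 * k
-- ===== Notes on version B (the rewrite author's own statement) =====
-- stated objective: simpler
-- what changed: Replaces A's alternating pop-loop over two sorted lists (plus a separate equal-length branch) with one closed formula: sum of the shorter list plus the top-k of the sorted longer list minus 2k; only the longer list is sorted.
import Mathlib
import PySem

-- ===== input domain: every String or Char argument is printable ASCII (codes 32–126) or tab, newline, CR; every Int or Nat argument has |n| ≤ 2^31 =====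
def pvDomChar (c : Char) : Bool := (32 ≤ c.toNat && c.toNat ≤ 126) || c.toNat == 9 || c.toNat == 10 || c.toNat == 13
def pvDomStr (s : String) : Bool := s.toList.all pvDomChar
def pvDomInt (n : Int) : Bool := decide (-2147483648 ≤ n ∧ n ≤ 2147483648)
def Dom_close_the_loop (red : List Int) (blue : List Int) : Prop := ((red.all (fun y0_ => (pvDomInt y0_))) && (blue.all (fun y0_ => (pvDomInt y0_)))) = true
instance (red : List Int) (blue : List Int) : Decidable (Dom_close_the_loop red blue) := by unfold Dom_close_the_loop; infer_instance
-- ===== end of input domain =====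

-- B replaces A's alternating pop-loop (and its separate equal-length branch) with one
-- closed formula over the shorter list and the top-k of the sorted longer list.

-- ===== PORT A =====
-- the 'while red and blue' loop: pop() takes the last element of the current colour
def pvLoopA (red : List Int) (blue : List Int) (length : Int) (used : Int) (curr : Bool) : Int :=
  if h : red ≠ [] ∧ blue ≠ [] then
    if curr then
      pvLoopA red.dropLast blue (length + red.getLast h.1) (used + 1) (!curr)
    else
      pvLoopA red blue.dropLast (length + blue.getLast h.2) (used + 1) (!curr)
  else
    length - used
termination_by red.length + blue.length
decreasing_by
  · have h1 := List.length_pos_iff.mpr h.1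
    have h2 : red.dropLast.length = red.length - 1 := List.length_dropLast
    omega
  · have h1 := List.length_pos_iff.mpr h.2
    have h2 : blue.dropLast.length = blue.length - 1 := List.length_dropLast
    omega

def close_the_loop (red : List Int) (blue : List Int) : Int :=
  let red1 := PySem.List.sorted red (fun x => x) false
  let blue1 := PySem.List.sorted blue (fun x => x) false
  if blue1.length == red1.length then
    blue1.sum + red1.sum - (blue1.length : Int) - (red1.length : Int)
  else
    let p := if red1.length < blue1.length then (blue1, red1) else (red1, blue1)
    pvLoopA p.1 p.2 0 0 true

-- ===== PORT B =====
def close_the_loop_alt (red : List Int) (blue : List Int) : Int :=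
  let p := if red.length < blue.length then (blue, red) else (red, blue)
  let k : Int := (p.2.length : Int)
  p.2.sum
    + (PySem.List.slice (PySem.List.sorted p.1 (fun x => x) false)
        (some ((p.1.length : Int) - k)) none).sum
    - 2 * k

-- ===== PRECONDITION & SPEC =====
def Spec_close_the_loop (red : List Int) (blue : List Int) (out : Int) : Prop := out = close_the_loop_alt red blue
instance (red : List Int) (blue : List Int) (out : Int) : Decidable (Spec_close_the_loop red blue out) := by unfold Spec_close_the_loop; infer_instance

-- ===== CLAIM (what is proved, stated in full; the proofs are below) =====
def Claim_equal_close_the_loop : Prop := ∀ (red : List Int) (blue : List Int), Dom_close_the_loop red blue → Spec_close_the_loop red blue (close_the_loop red blue)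

-- ===== LEMMAS AND PROOFS =====

lemma sum_eq_dropLast_add_getLast (l : List Int) (h : l ≠ []) :
    l.sum = l.dropLast.sum + l.getLast h := by
  conv_lhs => rw [← List.dropLast_append_getLast h]
  simp

lemma drop_eq_dropLast_drop_append (l : List Int) (m : Nat) (h : l ≠ []) (hm : m ≤ l.length - 1) :
    l.drop m = l.dropLast.drop m ++ [l.getLast h] := by
  conv_lhs => rw [← List.dropLast_append_getLast h]
  rw [List.drop_append_of_le_length]
  have h2 : l.dropLast.length = l.length - 1 := List.length_dropLast
  omega

lemma loopA_eq (n : Nat) : ∀ (R B : List Int) (L U : Int), B.length = n → B.length < R.length →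
    pvLoopA R B L U true =
      L - U + (R.drop (R.length - B.length)).sum + B.sum - 2 * (B.length : Int) := by
  induction n with
  | zero =>
    intro R B L U hB _
    have hBnil : B = [] := List.length_eq_zero_iff.mp hB
    subst hBnil
    rw [pvLoopA]
    simp
  | succ n ih =>
    intro R B L U hB hlt
    have hBne : B ≠ [] := by intro h; subst h; simp at hB
    have hRne : R ≠ [] := by intro h; subst h; simp at hlt
    have hRdl : R.dropLast.length = R.length - 1 := List.length_dropLast
    have hBdl : B.dropLast.length = B.length - 1 := List.length_dropLast
    have hRd : R.dropLast ≠ [] := by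
      intro h
      rw [h] at hRdl
      simp at hRdl
      omega
    rw [pvLoopA]
    simp only [hRne, hBne, ne_eq, not_false_iff, and_self, dite_true, if_true, Bool.not_true]
    rw [pvLoopA]
    simp only [hRd, hBne, ne_eq, not_false_iff, and_self, dite_true, Bool.not_false,
      Bool.false_eq_true, if_false]
    have hBd : B.dropLast.length = n := by omega
    have hlt' : B.dropLast.length < R.dropLast.length := by omega
    rw [ih R.dropLast B.dropLast _ _ hBd hlt']
    have hmle : R.length - B.length ≤ R.length - 1 := by omega
    have hdropeq : R.drop (R.length - B.length)
        = R.dropLast.drop (R.length - B.length) ++ [R.getLast hRne] := by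
      exact drop_eq_dropLast_drop_append R _ hRne hmle
    have hidx : R.dropLast.length - B.dropLast.length = R.length - B.length := by omega
    rw [hidx, hdropeq]
    rw [sum_eq_dropLast_add_getLast B hBne]
    simp only [List.sum_append, List.sum_cons, List.sum_nil]
    have hcast : (B.length : Int) = (B.dropLast.length : Int) + 1 := by omega
    rw [hcast]
    ring

lemma sorted_length (l : List Int) :
    (PySem.List.sorted l (fun x => x) false).length = l.length :=
  PySem.List.length_sorted l _ _

lemma sorted_sum (l : List Int) :
    (PySem.List.sorted l (fun x => x) false).sum = l.sum :=
  (PySem.List.sorted_perm l (fun x => x) false).sum_eq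

-- B's formula for a pair (longer, shorter): reduce the slice to a drop
lemma alt_branch (r b : List Int) (hk : b.length ≤ r.length) :
    b.sum + (PySem.List.slice (PySem.List.sorted r (fun x => x) false)
        (some ((r.length : Int) - (b.length : Int))) none).sum - 2 * (b.length : Int)
      = b.sum + ((PySem.List.sorted r (fun x => x) false).drop (r.length - b.length)).sum
          - 2 * (b.length : Int) := by
  have h0 : (0 : Int) ≤ (r.length : Int) - (b.length : Int) := by
    omega
  rw [PySem.List.slice_from _ h0]
  have ht : ((r.length : Int) - (b.length : Int)).toNat = r.length - b.length := by omega
  rw [ht]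

theorem close_the_loop_spec_aux (red blue : List Int) :
    close_the_loop red blue = close_the_loop_alt red blue := by
  unfold close_the_loop close_the_loop_alt
  by_cases heq : blue.length = red.length
  · simp only [sorted_length, heq, beq_self_eq_true, if_true, lt_irrefl, if_false]
    rw [PySem.List.slice_from _ (by omega : (0:Int) ≤ (red.length:Int) - (red.length:Int))]
    have ht : ((red.length:Int) - (red.length:Int)).toNat = 0 := by omega
    rw [ht, List.drop_zero, sorted_sum, sorted_sum]
    ring
  · have hne : (blue.length == red.length) = false := by
      simp; omega
    simp only [sorted_length, hne, Bool.false_eq_true, if_false]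
    by_cases hlt : red.length < blue.length
    · -- blue is strictly longer: swapped pair (blue, red)
      simp only [hlt, if_true]
      rw [loopA_eq red.length _ _ 0 0 (sorted_length red) (by rw [sorted_length, sorted_length]; omega)]
      rw [alt_branch blue red (by omega)]
      simp [sorted_sum]
      ring
    · -- red is strictly longer
      simp only [hlt, if_false]
      rw [loopA_eq blue.length _ _ 0 0 (sorted_length blue) (by rw [sorted_length, sorted_length]; omega)]
      rw [alt_branch red blue (by omega)]
      simp [sorted_sum]
      ring

-- ===== VERDICT (by name: the statement is the Claim_ definition above) =====
theorem close_the_loop_spec : Claim_equal_close_the_loop := by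
  intro red blue _
  exact close_the_loop_spec_aux red blue
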